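-- pv_equiv track=rewrite | github.com/Obsidian-Owl/specwright | evals/framework/grader.py | _final_non_empty_block
-- ===== SOURCE A (Python) =====
-- from typing import Any, Dict, List, Optional
--
-- def _final_non_empty_block(text: str) -> List[str]:
--     """Return the final non-empty block of lines from a text body.
--
--     A block is a run of consecutive non-empty lines, separated from prior
--     content by one or more blank lines. Trailing whitespace on the text is
--     stripped before splitting.
--     """
--     if not text:
--         return []
--     stripped = text.rstrip()
--     lines = stripped.split("\n")
--     block: List[str] = []
--     for line in reversed(lines):
--         if line.strip() == "":
--             if block:
--                 break
--             continue
--         block.append(line)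
--     block.reverse()
--     return block
-- ===== SOURCE B (Python) =====
-- from typing import List
--
-- def _final_non_empty_block(text: str) -> List[str]:
--     """Forward single pass: collect all blocks, return the last one."""
--     blocks: List[List[str]] = []
--     current: List[str] = []
--     for line in text.rstrip().split("\n"):
--         if line.strip() == "":
--             if current:
--                 blocks.append(current)
--                 current = []
--         else:
--             current.append(line)
--     if current:
--         blocks.append(current)
--     return blocks[-1] if blocks else []
-- ===== Notes on version B (the rewrite author's own statement) =====
-- stated objective: alternative
-- what changed: Replaces A's reversed-iteration with break-and-reverse by a forward single pass that accumulates whole blocks in order and returns the last one; no reversal and no empty-text guard needed.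
import Mathlib
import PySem

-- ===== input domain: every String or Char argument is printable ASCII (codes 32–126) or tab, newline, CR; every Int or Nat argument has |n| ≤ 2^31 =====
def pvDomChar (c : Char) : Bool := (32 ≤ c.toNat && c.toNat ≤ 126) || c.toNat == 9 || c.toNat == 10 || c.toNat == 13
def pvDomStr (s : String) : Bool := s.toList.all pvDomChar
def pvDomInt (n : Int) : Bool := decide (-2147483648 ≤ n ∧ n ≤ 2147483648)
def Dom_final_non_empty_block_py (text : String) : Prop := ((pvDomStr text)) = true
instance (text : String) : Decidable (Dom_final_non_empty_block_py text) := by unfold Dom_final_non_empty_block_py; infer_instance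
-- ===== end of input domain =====

-- B replaces A's backward scan-with-break plus reverse by a forward single pass over
-- all blocks, returning the last; alternative decomposition, same cost.

-- ===== PORT A =====
-- the 'for line in reversed(lines)' loop with its break, acc = block
def pvGoA : List String → List String → List String
  | [], block => block
  | line :: rest, block =>
    if PySem.Str.strip line == "" then
      if block ≠ [] then block else pvGoA rest block
    else pvGoA rest (block ++ [line])

def final_non_empty_block_py (text : String) : List String :=
  if text = "" then []
  else
    let stripped := PySem.Str.rstrip text
    let lines := (PySem.Str.split? stripped "\n").getD []
    (pvGoA lines.reverse []).reverse

-- ===== PORT B =====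
-- one forward step of Source B's loop over state (blocks, current)
def pvStepB (p : List (List String) × List String) (line : String) :
    List (List String) × List String :=
  if PySem.Str.strip line == "" then
    if p.2 ≠ [] then (p.1 ++ [p.2], []) else p
  else (p.1, p.2 ++ [line])

def final_non_empty_block_py_alt (text : String) : List String :=
  let lines := (PySem.Str.split? (PySem.Str.rstrip text) "\n").getD []
  let p := lines.foldl pvStepB ([], [])
  let blocks := if p.2 ≠ [] then p.1 ++ [p.2] else p.1
  blocks.getLastD []

-- ===== PRECONDITION & SPEC =====
def Spec_final_non_empty_block_py (text : String) (out : List String) : Prop := out = final_non_empty_block_py_alt text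
instance (text : String) (out : List String) : Decidable (Spec_final_non_empty_block_py text out) := by unfold Spec_final_non_empty_block_py; infer_instance

-- ===== CLAIM (what is proved, stated in full; the proofs are below) =====
def Claim_equal_final_non_empty_block_py : Prop := ∀ (text : String), Dom_final_non_empty_block_py text → Spec_final_non_empty_block_py text (final_non_empty_block_py text)

-- ===== LEMMAS AND PROOFS =====

-- a line is nonblank iff its strip is nonempty
def pvNonblank (line : String) : Bool := !(PySem.Str.strip line == "")

theorem pvGoA_ne_nil (rs acc : List String) (h : acc ≠ []) :
    pvGoA rs acc = acc ++ rs.takeWhile pvNonblank := by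
  induction rs generalizing acc with
  | nil => simp [pvGoA]
  | cons line rest ih =>
    cases hb : (PySem.Str.strip line == "") with
    | true => simp [pvGoA, hb, h, pvNonblank, List.takeWhile_cons]
    | false =>
      rw [pvGoA, if_neg (by simp [hb]), ih _ (by simp)]
      simp [pvNonblank, List.takeWhile_cons, hb]

theorem pvGoA_nil (rs : List String) :
    pvGoA rs [] = (rs.dropWhile (fun l => !pvNonblank l)).takeWhile pvNonblank := by
  induction rs with
  | nil => simp [pvGoA]
  | cons line rest ih =>
    cases hb : (PySem.Str.strip line == "") with
    | true => simp [pvGoA, hb, ih, pvNonblank, List.dropWhile_cons]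
    | false =>
      rw [pvGoA, if_neg (by simp [hb]), pvGoA_ne_nil _ _ (by simp)]
      simp [pvNonblank, List.dropWhile_cons, List.takeWhile_cons, hb]

theorem pvB_invariant (ls : List String) :
    (ls.foldl pvStepB ([], [])).2 = (ls.reverse.takeWhile pvNonblank).reverse ∧
    ((if (ls.foldl pvStepB ([], [])).2 ≠ [] then
        (ls.foldl pvStepB ([], [])).1 ++ [(ls.foldl pvStepB ([], [])).2]
      else (ls.foldl pvStepB ([], [])).1).getLastD []) =
      ((ls.reverse.dropWhile (fun l => !pvNonblank l)).takeWhile pvNonblank).reverse := by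
  induction ls using List.reverseRecOn with
  | nil => simp
  | append_singleton ls l ih =>
    obtain ⟨ih2, ihg⟩ := ih
    rw [List.foldl_append, List.foldl_cons, List.foldl_nil]
    cases hb : (PySem.Str.strip l == "") with
    | true =>
      rw [pvStepB, if_pos (by simp [hb] : (PySem.Str.strip l == "") = true)]
      have hdw : ((ls ++ [l]).reverse.dropWhile (fun l => !pvNonblank l)) =
          (ls.reverse.dropWhile (fun l => !pvNonblank l)) := by
        simp [List.dropWhile_cons, pvNonblank, hb]
      have htw : ((ls ++ [l]).reverse.takeWhile pvNonblank) = [] := by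
        simp [List.takeWhile_cons, pvNonblank, hb]
      constructor
      · split
        · simp [List.takeWhile_cons, pvNonblank, hb]
        · rename_i hc
          simp only [ne_eq, not_not] at hc
          simp [hc, List.takeWhile_cons, pvNonblank, hb]
      · rw [hdw, ← ihg]
        split <;> simp
    | false =>
      rw [pvStepB, if_neg (by simp [hb])]
      constructor
      · simp [List.takeWhile_cons, pvNonblank, hb, ih2]
      · rw [if_pos (by simp)]
        simp [List.dropWhile_cons, List.takeWhile_cons, pvNonblank, hb, ih2]

-- ===== VERDICT (by name: the statement is the Claim_ definition above) =====
theorem final_non_empty_block_py_spec : Claim_equal_final_non_empty_block_py := by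
  intro text _
  unfold Spec_final_non_empty_block_py
  by_cases ht : text = ""
  · subst ht; decide
  · rw [final_non_empty_block_py, if_neg ht]
    show (pvGoA ((PySem.Str.split? (PySem.Str.rstrip text) "\n").getD []).reverse []).reverse = _
    rw [pvGoA_nil]
    exact (pvB_invariant _).2.symm
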